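-- pv_equiv track=rewrite | github.com/finefine2/codetree-TILs | 240208/가능한 수열 중 최솟값 구하기/find-min-of-possible-series.py | find
-- ===== SOURCE A (Python) =====
-- def find(arr):
--     cnt = 1
--     while True:
--         a1, b1 = len(arr) - cnt, len(arr) - 1
--         a2, b2 = a1 - cnt, a1 - 1
--
--         # a1 < cnt가 되도 break
--         if a2 < 0:
--             break
--
--         # (cnt, 1) 구간과 (a1 - cnt, a1 - 1)의 구간이 같을 경우 False
--         # 이 값들은 cnt가 늘어나면서 바뀐다.
--         if arr[a1 : b1 + 1] == arr[a2 : b2 + 1]: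
--             return False
--         cnt += 1
--     return True
-- ===== SOURCE B (Python) =====
-- def find(arr):
--     # Z-algorithm on the reversed array: one linear pass computing, for every
--     # position i, the length z[i] of the longest common prefix of s and s[i:],
--     # reusing the maintained rightmost match window [l, r).  The last k
--     # elements of arr equal the k before them iff z[k] >= k, so the answer is
--     # all(z[k] < k) for k up to n//2.
--     s = arr[::-1]
--     n = len(s)
--     z = [0] * n
--     l = r = 0
--     for i in range(1, n):
--         if i < r:
--             z[i] = min(r - i, z[i - l])
--         while i + z[i] < n and s[z[i]] == s[i + z[i]]:
--             z[i] += 1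
--         if i + z[i] > r:
--             l, r = i, i + z[i]
--     return all(z[k] < k for k in range(1, n // 2 + 1))
-- ===== Notes on version B (the rewrite author's own statement) =====
-- stated objective: faster
-- what changed: B runs the linear-time Z-algorithm once on the reversed array (maintaining the rightmost match window [l,r) to seed each LCP from previously computed entries) and then reads off whether any z[k] >= k, instead of A's independently materializing and comparing two length-cnt slices for every cnt.
import Mathlib
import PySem

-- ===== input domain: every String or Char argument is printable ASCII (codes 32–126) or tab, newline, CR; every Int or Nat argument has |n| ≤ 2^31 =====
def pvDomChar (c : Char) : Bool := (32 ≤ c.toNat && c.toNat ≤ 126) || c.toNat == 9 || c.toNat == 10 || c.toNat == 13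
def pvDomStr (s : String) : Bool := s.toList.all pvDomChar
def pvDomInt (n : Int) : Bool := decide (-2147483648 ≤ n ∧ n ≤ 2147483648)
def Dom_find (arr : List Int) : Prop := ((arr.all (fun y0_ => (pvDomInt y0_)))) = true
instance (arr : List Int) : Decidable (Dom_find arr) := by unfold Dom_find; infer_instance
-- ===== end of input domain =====

-- B replaces A's per-cnt slice building and comparison with one linear Z-algorithm pass over the
-- reversed array followed by reading off whether any z[k] >= k (asymptotically faster, O(n) vs O(n^2)).

-- ===== PORT A =====
-- the 'while True' loop of A; cnt = 1, 2, … until a2 < 0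
def findLoop (arr : List Int) (cnt : Nat) : Bool :=
  let a1 : Int := (arr.length : Int) - cnt
  let b1 : Int := (arr.length : Int) - 1
  let a2 : Int := a1 - cnt
  let b2 : Int := a1 - 1
  if a2 < 0 then true
  else if PySem.List.slice arr (some a1) (some (b1 + 1)) = PySem.List.slice arr (some a2) (some (b2 + 1)) then false
  else findLoop arr (cnt + 1)
termination_by arr.length + 1 - 2 * cnt
decreasing_by simp only [not_lt] at *; omega

def find (arr : List Int) : Bool := findLoop arr 1

-- ===== PORT B =====
-- B's inner 'while' loop: starting from z[i] = j, extend while s[z[i]] == s[i + z[i]]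
def lcpExt (s : List Int) (i j : Nat) : Nat :=
  if h : i + j < s.length ∧ s.getD j 0 = s.getD (i + j) 0 then lcpExt s i (j + 1) else j
termination_by s.length - (i + j)
decreasing_by omega

-- B's 'for i in range(1, n)' loop: state is the list z and the window bounds l, r
def zLoop (s : List Int) (i : Nat) (z : List Nat) (l r : Nat) : List Nat :=
  if _h : i < s.length then
    let z0 : Nat := if i < r then min (r - i) (z.getD (i - l) 0) else 0
    let zi : Nat := lcpExt s i z0
    let z' := z.set i zi
    if r < i + zi then zLoop s (i + 1) z' i (i + zi) else zLoop s (i + 1) z' l r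
  else z
termination_by s.length - i

def find_alt (arr : List Int) : Bool :=
  let s := arr.reverse
  let n := s.length
  let z := zLoop s 1 (List.replicate n 0) 0 0
  -- all(z[k] < k for k in range(1, n//2+1))
  !((List.range' 1 (n / 2)).any (fun k => decide (k ≤ z.getD k 0)))

-- ===== PRECONDITION & SPEC =====
def Spec_find (arr : List Int) (out : Bool) : Prop := out = find_alt arr
instance (arr : List Int) (out : Bool) : Decidable (Spec_find arr out) := by unfold Spec_find; infer_instance

-- ===== CLAIM (what is proved, stated in full; the proofs are below) =====
def Claim_equal_find : Prop := ∀ (arr : List Int), Dom_find arr → Spec_find arr (find arr)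

-- ===== LEMMAS AND PROOFS =====

theorem lcpExt_self_le (s : List Int) (i j : Nat) : j ≤ lcpExt s i j := by
  fun_induction lcpExt with
  | case1 h ih => omega
  | case2 h => omega

-- every offset below the computed LCP is an in-range match
theorem lcpExt_matches (s : List Int) (i j : Nat) :
    ∀ t, j ≤ t → t < lcpExt s i j → i + t < s.length ∧ s.getD t 0 = s.getD (i + t) 0 := by
  fun_induction lcpExt with
  | case1 j h ih =>
    intro t h1 h2
    rcases Nat.eq_or_lt_of_le h1 with rfl | h1
    · exact h
    · exact ih t h1 h2
  | case2 j h => intro t h1 h2; omega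

-- a matching prefix below the start offset does not change the extension's result
theorem lcpExt_prepend (s : List Int) (i : Nat) :
    ∀ j, (∀ t, t < j → i + t < s.length ∧ s.getD t 0 = s.getD (i + t) 0) →
      lcpExt s i j = lcpExt s i 0 := by
  intro j
  induction j with
  | zero => intro _; rfl
  | succ j ih =>
    intro H
    have hstep : lcpExt s i j = lcpExt s i (j + 1) := by
      rw [lcpExt, dif_pos (H j (by omega))]
    rw [← hstep, ih (fun t ht => H t (by omega))]

theorem lcpExt_ge_iff (s : List Int) (k : Nat) (hk : 2 * k ≤ s.length) :
    ∀ d j, k - j = d → j ≤ k →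
      (k ≤ lcpExt s k j ↔ ∀ i, j ≤ i → i < k → s.getD i 0 = s.getD (k + i) 0) := by
  intro d
  induction d with
  | zero =>
    intro j hd hj
    have hjk : j = k := by omega
    constructor
    · intro _ i h1 h2; omega
    · intro _; rw [hjk]; exact lcpExt_self_le s k k
  | succ d ih =>
    intro j hd hj
    have hjlt : j < k := by omega
    rw [lcpExt]
    have hin : k + j < s.length := by omega
    by_cases hm : s.getD j 0 = s.getD (k + j) 0
    · have hc : k + j < s.length ∧ s.getD j 0 = s.getD (k + j) 0 := ⟨hin, hm⟩
      rw [dif_pos hc]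
      rw [ih (j + 1) (by omega) (by omega)]
      constructor
      · intro H i h1 h2
        rcases Nat.eq_or_lt_of_le h1 with h | h
        · subst h; exact hm
        · exact H i h h2
      · intro H i h1 h2; exact H i (by omega) h2
    · have hc : ¬ (k + j < s.length ∧ s.getD j 0 = s.getD (k + j) 0) := by
        intro h; exact hm h.2
      rw [dif_neg hc]
      constructor
      · intro h; omega
      · intro H; exact absurd (H j le_rfl hjlt) hm

theorem getD_reverse (arr : List Int) (i : Nat) (hi : i < arr.length) :
    arr.reverse.getD i 0 = arr.getD (arr.length - 1 - i) 0 := by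
  simp [List.getD_eq_getElem?_getD, List.getElem?_reverse hi]

-- pointwise characterization of A's slice comparison (indices shifted to the reversed view)
theorem rev_bridge (arr : List Int) (c : Nat) (h1 : 1 ≤ c) (h2 : 2 * c ≤ arr.length) :
    (∀ i, i < c → arr.reverse.getD i 0 = arr.reverse.getD (c + i) 0) ↔
    (∀ i, i < c → arr.getD (arr.length - c + i) 0 = arr.getD (arr.length - 2 * c + i) 0) := by
  constructor
  · intro H i hi
    have := H (c - 1 - i) (by omega)
    rw [getD_reverse arr (c - 1 - i) (by omega), getD_reverse arr (c + (c - 1 - i)) (by omega)] at this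
    have e1 : arr.length - 1 - (c - 1 - i) = arr.length - c + i := by omega
    have e2 : arr.length - 1 - (c + (c - 1 - i)) = arr.length - 2 * c + i := by omega
    rw [e1, e2] at this
    exact this
  · intro H i hi
    have := H (c - 1 - i) (by omega)
    rw [getD_reverse arr i (by omega), getD_reverse arr (c + i) (by omega)]
    have e1 : arr.length - c + (c - 1 - i) = arr.length - 1 - i := by omega
    have e2 : arr.length - 2 * c + (c - 1 - i) = arr.length - 1 - (c + i) := by omega
    rw [e1, e2] at this
    exact this

theorem slice_eq_iff (arr : List Int) (c : Nat) (h1 : 1 ≤ c) (h2 : 2 * c ≤ arr.length) :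
    ((arr.drop (arr.length - c)).take c = (arr.drop (arr.length - 2 * c)).take c) ↔
    (∀ i, i < c → arr.getD (arr.length - c + i) 0 = arr.getD (arr.length - 2 * c + i) 0) := by
  constructor
  · intro he i hi
    have := congrArg (fun l => l.getD i 0) he
    simp only [List.getD_eq_getElem?_getD, List.getElem?_take, List.getElem?_drop] at this
    simp only [if_pos hi] at this
    simpa [List.getD_eq_getElem?_getD] using this
  · intro H
    apply List.ext_getElem?
    intro i
    simp only [List.getElem?_take, List.getElem?_drop]
    by_cases hi : i < c
    · simp only [if_pos hi]
      have := H i hi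
      simp only [List.getD_eq_getElem?_getD] at this
      have hb1 : arr.length - c + i < arr.length := by omega
      have hb2 : arr.length - 2 * c + i < arr.length := by omega
      rw [List.getElem?_eq_getElem hb1, List.getElem?_eq_getElem hb2] at this ⊢
      simp only [Option.getD_some] at this
      exact congrArg some this
    · simp [if_neg hi]

-- A's slice test equals the LCP test on the reversed array, for 1 ≤ c and 2*c ≤ n
theorem cond_iff (arr : List Int) (c : Nat) (h1 : 1 ≤ c) (h2 : 2 * c ≤ arr.length) :
    (PySem.List.slice arr (some ((arr.length : Int) - c)) (some ((arr.length : Int) - 1 + 1)) =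
     PySem.List.slice arr (some ((arr.length : Int) - c - c)) (some ((arr.length : Int) - c - 1 + 1)))
    ↔ c ≤ lcpExt arr.reverse c 0 := by
  have e0 : (arr.length : Int) - 1 + 1 = ((arr.length : Nat) : Int) := by ring
  have e1 : (arr.length : Int) - c = ((arr.length - c : Nat) : Int) := by omega
  have e2 : (arr.length : Int) - c - c = ((arr.length - 2 * c : Nat) : Int) := by omega
  have e3 : (arr.length : Int) - c - 1 + 1 = ((arr.length - c : Nat) : Int) := by omega
  rw [e2, e3, e1, e0, PySem.List.slice_natCast, PySem.List.slice_natCast]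
  have e4 : arr.length - (arr.length - c) = c := by omega
  have e5 : arr.length - c - (arr.length - 2 * c) = c := by omega
  rw [e4, e5, slice_eq_iff arr c h1 h2]
  rw [lcpExt_ge_iff arr.reverse c (by simpa using h2) c 0 (by omega) (by omega)]
  have := rev_bridge arr c h1 h2
  constructor
  · intro H i _ hi; exact this.mpr H i hi
  · intro H; exact this.mp (fun i hi => H i (by omega) hi)

theorem getD_set_self (z : List Nat) (i v : Nat) (h : i < z.length) :
    (z.set i v).getD i 0 = v := by
  simp [List.getD_eq_getElem?_getD, h]

theorem getD_set_ne (z : List Nat) (i j v : Nat) (h : j ≠ i) :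
    (z.set i v).getD j 0 = z.getD j 0 := by
  simp [List.getD_eq_getElem?_getD, List.getElem?_set_ne (fun he => h he.symm)]

-- the seeded extension start is below the true LCP, so the extension computes the true LCP at i
theorem zi_correct (s : List Int) (i : Nat) (z : List Nat) (l r : Nat)
    (hcomp : ∀ j, 1 ≤ j → j < i → z.getD j 0 = lcpExt s j 0)
    (hinv : (r = 0 ∧ l = 0) ∨ (1 ≤ l ∧ l < i ∧ r = l + lcpExt s l 0)) :
    lcpExt s i (if i < r then min (r - i) (z.getD (i - l) 0) else 0) = lcpExt s i 0 := by
  by_cases hir : i < r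
  · rw [if_pos hir]
    apply lcpExt_prepend
    intro t ht
    rcases hinv with ⟨hr0, _⟩ | ⟨hl1, hli, hr⟩
    · omega
    · rw [hcomp (i - l) (by omega) (by omega)] at ht
      have ht1 : t < r - i := by omega
      have ht2 : t < lcpExt s (i - l) 0 := by omega
      have m1 := lcpExt_matches s (i - l) 0 t (by omega) ht2
      have ht3 : (i - l) + t < lcpExt s l 0 := by omega
      have m2 := lcpExt_matches s l 0 ((i - l) + t) (by omega) ht3
      have e : l + ((i - l) + t) = i + t := by omega
      rw [e] at m2
      exact ⟨m2.1, m1.2.trans m2.2⟩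
  · rw [if_neg hir]

-- invariant of the Z-algorithm loop: all computed entries are the true LCPs
theorem zLoop_spec (s : List Int) :
    ∀ i z l r, 1 ≤ i → z.length = s.length →
      (∀ j, 1 ≤ j → j < i → z.getD j 0 = lcpExt s j 0) →
      ((r = 0 ∧ l = 0) ∨ (1 ≤ l ∧ l < i ∧ r = l + lcpExt s l 0)) →
      ∀ k, 1 ≤ k → k < s.length → (zLoop s i z l r).getD k 0 = lcpExt s k 0 := by
  intro i z l r
  fun_induction zLoop with
  | case1 i z l r hi z0 zi z' hupd ih =>
    intro h1 hlen hcomp hinv k hk1 hk2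
    have hzi : zi = lcpExt s i 0 := zi_correct s i z l r hcomp hinv
    have hiz : i < z.length := by omega
    apply ih (by omega) (by simpa [z'] using hlen)
    · intro j hj1 hj2
      by_cases hji : j = i
      · subst hji
        rw [getD_set_self z j zi hiz, hzi]
      · rw [getD_set_ne z i j zi hji]
        exact hcomp j hj1 (by omega)
    · right
      exact ⟨by omega, by omega, by rw [hzi]⟩
    · exact hk1
    · exact hk2
  | case2 i z l r hi z0 zi z' hupd ih =>
    intro h1 hlen hcomp hinv k hk1 hk2
    have hzi : zi = lcpExt s i 0 := zi_correct s i z l r hcomp hinv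
    have hiz : i < z.length := by omega
    apply ih (by omega) (by simpa [z'] using hlen)
    · intro j hj1 hj2
      by_cases hji : j = i
      · subst hji
        rw [getD_set_self z j zi hiz, hzi]
      · rw [getD_set_ne z i j zi hji]
        exact hcomp j hj1 (by omega)
    · rcases hinv with ⟨hr0, hl0⟩ | ⟨hl1, hli, hr⟩
      · omega
      · right; exact ⟨hl1, by omega, hr⟩
    · exact hk1
    · exact hk2
  | case3 i z l r hi =>
    intro h1 hlen hcomp hinv k hk1 hk2
    exact hcomp k hk1 (by omega)

-- A's loop, expressed as an 'any' over the remaining block lengths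
theorem findLoop_eq (arr : List Int) :
    ∀ m c, arr.length + 1 - 2 * c = m → 1 ≤ c →
      findLoop arr c =
        !((List.range' c (arr.length / 2 + 1 - c)).any
            (fun k => decide (k ≤ lcpExt arr.reverse k 0))) := by
  intro m
  induction m using Nat.strong_induction_on with
  | _ m ih =>
    intro c hm hc
    rw [findLoop]
    by_cases hend : 2 * c ≤ arr.length
    · have hneg : ¬ ((arr.length : Int) - c - c < 0) := by omega
      rw [if_neg hneg]
      have hcle : c ≤ arr.length / 2 := by omega
      have hlen : arr.length / 2 + 1 - c = (arr.length / 2 - c) + 1 := by omega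
      rw [hlen, List.range'_succ, List.any_cons]
      by_cases hcond : c ≤ lcpExt arr.reverse c 0
      · rw [if_pos ((cond_iff arr c hc hend).mpr hcond)]
        simp [hcond]
      · rw [if_neg (fun h => hcond ((cond_iff arr c hc hend).mp h))]
        rw [ih (arr.length + 1 - 2 * (c + 1)) (by omega) (c + 1) rfl (by omega)]
        have e : arr.length / 2 + 1 - (c + 1) = arr.length / 2 - c := by omega
        rw [e]
        simp [hcond]
    · have hneg : (arr.length : Int) - c - c < 0 := by omega
      rw [if_pos hneg]
      have : arr.length / 2 + 1 - c = 0 := by omega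
      simp [this]

theorem any_congr_mem {l : List Nat} {p q : Nat → Bool}
    (h : ∀ x ∈ l, p x = q x) : l.any p = l.any q := by
  induction l with
  | nil => rfl
  | cons a t ih =>
    simp only [List.any_cons, h a (List.mem_cons_self), ih (fun x hx => h x (List.mem_cons_of_mem a hx))]

-- ===== VERDICT (by name: the statement is the Claim_ definition above) =====
theorem find_spec : Claim_equal_find := by
  intro arr _
  show find arr = find_alt arr
  unfold find find_alt
  rw [findLoop_eq arr (arr.length + 1 - 2) 1 rfl le_rfl]
  have hlen : arr.reverse.length = arr.length := by simp
  simp only [hlen]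
  have e : arr.length / 2 + 1 - 1 = arr.length / 2 := by omega
  rw [e]
  congr 1
  apply any_congr_mem
  intro k hk
  have hk' := List.mem_range'_1.mp hk
  have hz := zLoop_spec arr.reverse 1 (List.replicate arr.reverse.length 0) 0 0
      le_rfl (by simp) (by intro j hj1 hj2; omega) (Or.inl ⟨rfl, rfl⟩)
      k (by omega) (by rw [hlen]; omega)
  simp only [hlen] at hz
  rw [hz]
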